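-- pv_equiv track=rewrite | github.com/ZJFishy/AoC-2022 | day_11.py | monkey_2
-- ===== SOURCE A (Python) =====
-- def monkey_2(id:int, items:list[list[int]]) -> (list[list[int]], int):
--     count = 0
--     if id == 0:
--         for entry in items[0]:
--             count += 1
--             new = (entry * 5)
--             if new % 3 == 0:
--                 items[7].append(new)
--             else:
--                 items[4].append(new)
--         items[0] = []
--     elif id == 1:
--         for entry in items[1]:
--             count += 1
--             new = (entry + 6)
--             if new % 17 == 0:
--                 items[3].append(new)
--             else:
--                 items[0].append(new)
--         items[1] = []
--     elif id == 2:
--         for entry in items[2]: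
--             count += 1
--             new = (entry + 5)
--             if new % 2 == 0:
--                 items[3].append(new)
--             else:
--                 items[1].append(new)
--         items[2] = []
--     elif id == 3:
--         for entry in items[3]:
--             count += 1
--             new = (entry + 2)
--             if new % 19 == 0:
--                 items[7].append(new)
--             else:
--                 items[0].append(new)
--         items[3] = []
--     elif id == 4:
--         for entry in items[4]:
--             count += 1
--             new = (entry * 7)
--             if new % 11 == 0:
--                 items[5].append(new)
--             else:
--                 items[6].append(new)
--         items[4] = []
--     elif id == 5:
--         for entry in items[5]:
--             count += 1
--             new = (entry + 7)
--             if new % 5 == 0: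
--                 items[2].append(new)
--             else:
--                 items[1].append(new)
--         items[5] = []
--     elif id == 6:
--         for entry in items[6]:
--             count += 1
--             new = (entry + 1)
--             if new % 13 == 0:
--                 items[5].append(new)
--             else:
--                 items[2].append(new)
--         items[6] = []
--     else:
--         for entry in items[7]:
--             count += 1
--             new = (entry * entry)
--             if new % 7 == 0:
--                 items[4].append(new)
--             else:
--                 items[6].append(new)
--         items[7] = []
--
--     return (items, count)
-- ===== SOURCE B (Python) =====
-- # Staged-passes rewrite: map the whole batch through the monkey's operation,
-- # stably partition it into the divisible/non-divisible halves, and bulk-extend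
-- # the two target slots, instead of A's per-item branch-and-append routing loop.
-- # Like A, mutates `items` in place (same final state).
-- RULES = {
--     0: (lambda e: e * 5, 3, 7, 4),
--     1: (lambda e: e + 6, 17, 3, 0),
--     2: (lambda e: e + 5, 2, 3, 1),
--     3: (lambda e: e + 2, 19, 7, 0),
--     4: (lambda e: e * 7, 11, 5, 6),
--     5: (lambda e: e + 7, 5, 2, 1),
--     6: (lambda e: e + 1, 13, 5, 2),
-- }
--
-- def monkey_2(id: int, items: list[list[int]]) -> (list[list[int]], int):
--     op, d, t_div, t_else = RULES.get(id, (lambda e: e * e, 7, 4, 6))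
--     src = id if id in RULES else 7
--     news = [op(e) for e in items[src]]
--     divs = [n for n in news if n % d == 0]
--     rest = [n for n in news if n % d != 0]
--     for t, chunk in ((t_div, divs), (t_else, rest)):
--         if chunk:
--             items[t] += chunk
--     items[src] = []
--     return (items, len(news))
-- ===== Notes on version B (the rewrite author's own statement) =====
-- stated objective: alternative
-- what changed: Replaces A's single per-item routing loop (branch-and-append with a running counter) by staged passes: map the whole batch through the monkey's operation, stably partition it into the divisible and non-divisible halves with two filters, then bulk-extend the two target slots once each; correct because the routing is a stable partition and appends to distinct slots commute.
import Mathlib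
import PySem

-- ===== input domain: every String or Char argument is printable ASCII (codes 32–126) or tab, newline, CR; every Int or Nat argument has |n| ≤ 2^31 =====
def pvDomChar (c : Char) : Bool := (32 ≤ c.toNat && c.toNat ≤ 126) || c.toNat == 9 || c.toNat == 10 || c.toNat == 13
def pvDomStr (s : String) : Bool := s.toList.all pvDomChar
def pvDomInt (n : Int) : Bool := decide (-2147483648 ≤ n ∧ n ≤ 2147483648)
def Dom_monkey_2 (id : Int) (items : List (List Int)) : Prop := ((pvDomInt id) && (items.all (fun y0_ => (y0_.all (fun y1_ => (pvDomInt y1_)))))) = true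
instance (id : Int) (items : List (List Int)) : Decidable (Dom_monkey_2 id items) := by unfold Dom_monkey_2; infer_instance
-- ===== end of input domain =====

-- B replaces A's per-item routing loop by staged passes: map the batch through the
-- monkey's operation, stably partition by divisibility, then bulk-extend the two target
-- slots (objective: alternative). Both Pythons mutate `items` in place the same way;
-- the equivalence proved here is about the returned value.

-- ===== PORT A =====
-- items[i].append(v), as a functional update (index always in range under Pre_)
-- (a no-op when i is out of range; on inputs where the Python raises IndexError nothing is tested)
def pvPushA (xs : List (List Int)) (i : Nat) (v : Int) : List (List Int) :=
  xs.set i (xs.getD i [] ++ [v])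

def monkey_2 (id : Int) (items : List (List Int)) : List (List Int) × Int :=
  if id = 0 then
    let st := ((PySem.List.pyGet? items 0).getD []).foldl (fun (st : List (List Int) × Int) entry =>
      let count := st.2 + 1
      let new := entry * 5
      if PySem.Int.mod new 3 = 0 then (pvPushA st.1 7 new, count) else (pvPushA st.1 4 new, count)) (items, 0)
    (st.1.set 0 [], st.2)
  else if id = 1 then
    let st := ((PySem.List.pyGet? items 1).getD []).foldl (fun (st : List (List Int) × Int) entry =>
      let count := st.2 + 1
      let new := entry + 6
      if PySem.Int.mod new 17 = 0 then (pvPushA st.1 3 new, count) else (pvPushA st.1 0 new, count)) (items, 0)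
    (st.1.set 1 [], st.2)
  else if id = 2 then
    let st := ((PySem.List.pyGet? items 2).getD []).foldl (fun (st : List (List Int) × Int) entry =>
      let count := st.2 + 1
      let new := entry + 5
      if PySem.Int.mod new 2 = 0 then (pvPushA st.1 3 new, count) else (pvPushA st.1 1 new, count)) (items, 0)
    (st.1.set 2 [], st.2)
  else if id = 3 then
    let st := ((PySem.List.pyGet? items 3).getD []).foldl (fun (st : List (List Int) × Int) entry =>
      let count := st.2 + 1
      let new := entry + 2
      if PySem.Int.mod new 19 = 0 then (pvPushA st.1 7 new, count) else (pvPushA st.1 0 new, count)) (items, 0)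
    (st.1.set 3 [], st.2)
  else if id = 4 then
    let st := ((PySem.List.pyGet? items 4).getD []).foldl (fun (st : List (List Int) × Int) entry =>
      let count := st.2 + 1
      let new := entry * 7
      if PySem.Int.mod new 11 = 0 then (pvPushA st.1 5 new, count) else (pvPushA st.1 6 new, count)) (items, 0)
    (st.1.set 4 [], st.2)
  else if id = 5 then
    let st := ((PySem.List.pyGet? items 5).getD []).foldl (fun (st : List (List Int) × Int) entry =>
      let count := st.2 + 1
      let new := entry + 7
      if PySem.Int.mod new 5 = 0 then (pvPushA st.1 2 new, count) else (pvPushA st.1 1 new, count)) (items, 0)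
    (st.1.set 5 [], st.2)
  else if id = 6 then
    let st := ((PySem.List.pyGet? items 6).getD []).foldl (fun (st : List (List Int) × Int) entry =>
      let count := st.2 + 1
      let new := entry + 1
      if PySem.Int.mod new 13 = 0 then (pvPushA st.1 5 new, count) else (pvPushA st.1 2 new, count)) (items, 0)
    (st.1.set 6 [], st.2)
  else
    let st := ((PySem.List.pyGet? items 7).getD []).foldl (fun (st : List (List Int) × Int) entry =>
      let count := st.2 + 1
      let new := entry * entry
      if PySem.Int.mod new 7 = 0 then (pvPushA st.1 4 new, count) else (pvPushA st.1 6 new, count)) (items, 0)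
    (st.1.set 7 [], st.2)

-- ===== PORT B =====
inductive PvOp where
  | mul : Int → PvOp
  | add : Int → PvOp
  | square : PvOp
deriving DecidableEq, Repr

def PvOp.apply : PvOp → Int → Int
  | .mul k, e => e * k
  | .add k, e => e + k
  | .square, e => e * e

-- the RULES table: id ↦ (op, divisor, target if divisible, target else)
def pvRules : List (Int × PvOp × Int × Nat × Nat) :=
  [(0, .mul 5, 3, 7, 4), (1, .add 6, 17, 3, 0), (2, .add 5, 2, 3, 1),
   (3, .add 2, 19, 7, 0), (4, .mul 7, 11, 5, 6), (5, .add 7, 5, 2, 1),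
   (6, .add 1, 13, 5, 2)]

-- items[t] += chunk, as a functional update (no-op when t is out of range)
def pvExtend (xs : List (List Int)) (t : Nat) (chunk : List Int) : List (List Int) :=
  xs.set t (xs.getD t [] ++ chunk)

def monkey_2_alt (id : Int) (items : List (List Int)) : List (List Int) × Int :=
  match PySem.Dict.getD ⟨pvRules⟩ id (.square, 7, 4, 6) with
  | (op, d, tDiv, tElse) =>
    let src : Nat := if (PySem.Dict.get? (⟨pvRules⟩ : PySem.Dict Int _) id).isSome then id.toNat else 7
    let news := ((PySem.List.pyGet? items (src : Int)).getD []).map op.apply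
    let divs := news.filter (fun n => decide (PySem.Int.mod n d = 0))
    let rest := news.filter (fun n => decide (¬ PySem.Int.mod n d = 0))
    let its := if divs.isEmpty then items else pvExtend items tDiv divs
    let its := if rest.isEmpty then its else pvExtend its tElse rest
    (its.set src [], (news.length : Int))

-- ===== PRECONDITION & SPEC =====
-- Pre_ admits exactly the inputs on which Python A returns: the source slot exists and
-- every throw lands on an existing slot (otherwise list indexing raises IndexError; B raises there too).
def pvTarget (id : Int) (e : Int) : Nat :=
  if id = 0 then (if PySem.Int.mod (e * 5) 3 = 0 then 7 else 4)
  else if id = 1 then (if PySem.Int.mod (e + 6) 17 = 0 then 3 else 0)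
  else if id = 2 then (if PySem.Int.mod (e + 5) 2 = 0 then 3 else 1)
  else if id = 3 then (if PySem.Int.mod (e + 2) 19 = 0 then 7 else 0)
  else if id = 4 then (if PySem.Int.mod (e * 7) 11 = 0 then 5 else 6)
  else if id = 5 then (if PySem.Int.mod (e + 7) 5 = 0 then 2 else 1)
  else if id = 6 then (if PySem.Int.mod (e + 1) 13 = 0 then 5 else 2)
  else (if PySem.Int.mod (e * e) 7 = 0 then 4 else 6)

def Pre_monkey_2 (id : Int) (items : List (List Int)) : Prop :=
  (if 0 ≤ id ∧ id ≤ 6 then id.toNat else 7) < items.length ∧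
  ∀ e ∈ items.getD (if 0 ≤ id ∧ id ≤ 6 then id.toNat else 7) [], pvTarget id e < items.length
instance (id : Int) (items : List (List Int)) : Decidable (Pre_monkey_2 id items) := by unfold Pre_monkey_2; infer_instance

def pvWitness_monkey_2 : Int × List (List Int) := (0, [[3], [], [], [], [], [], [], []])

def Spec_monkey_2 (id : Int) (items : List (List Int)) (out : List (List Int) × Int) : Prop := out = monkey_2_alt id items
instance (id : Int) (items : List (List Int)) (out : List (List Int) × Int) : Decidable (Spec_monkey_2 id items out) := by unfold Spec_monkey_2; infer_instance

-- ===== CLAIM (what is proved, stated in full; the proofs are below) =====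
def Claim_equal_monkey_2 : Prop := ∀ (id : Int) (items : List (List Int)), Dom_monkey_2 id items → Pre_monkey_2 id items → Spec_monkey_2 id items (monkey_2 id items)

-- ===== LEMMAS AND PROOFS =====

theorem pvExtend_nil (xs : List (List Int)) (t : Nat) : pvExtend xs t [] = xs := by
  unfold pvExtend
  by_cases h : t < xs.length
  · apply List.ext_getElem?
    intro i
    by_cases hi : i = t <;> simp [hi, List.getD, h]
  · rw [List.set_eq_of_length_le (by omega)]

theorem pvExtend_guard (xs : List (List Int)) (t : Nat) (L : List Int) :
    (if L.isEmpty then xs else pvExtend xs t L) = pvExtend xs t L := by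
  cases L with
  | nil => simp [pvExtend_nil]
  | cons a l => rfl

theorem pvExtend_cons (xs : List (List Int)) (t : Nat) (n : Int) (L : List Int) :
    pvExtend xs t (n :: L) = pvExtend (pvPushA xs t n) t L := by
  unfold pvExtend pvPushA
  by_cases h : t < xs.length
  · simp [List.getD_eq_getElem?_getD, h]
  · have hx : xs.set t (xs.getD t [] ++ [n]) = xs := List.set_eq_of_length_le (by omega)
    rw [List.set_eq_of_length_le (by omega), hx, List.set_eq_of_length_le (by omega)]

theorem pvPushA_pvExtend_comm (xs : List (List Int)) (t1 t2 : Nat) (h : t1 ≠ t2)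
    (L : List Int) (n : Int) :
    pvPushA (pvExtend xs t1 L) t2 n = pvExtend (pvPushA xs t2 n) t1 L := by
  unfold pvExtend pvPushA
  rw [List.set_comm _ _ h]
  congr 2 <;>
    simp [List.getD_eq_getElem?_getD, List.getElem?_set_ne h, List.getElem?_set_ne (Ne.symm h)]

-- the routing loop is a stable partition followed by two bulk extends
theorem pv_partition (f : Int → Int) (d : Int) (t1 t2 : Nat) (h : t1 ≠ t2)
    (L : List Int) (xs : List (List Int)) :
    L.foldl (fun its e =>
        let new := f e
        if PySem.Int.mod new d = 0 then pvPushA its t1 new else pvPushA its t2 new) xs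
    = pvExtend (pvExtend xs t1 ((L.map f).filter (fun n => decide (PySem.Int.mod n d = 0)))) t2
        ((L.map f).filter (fun n => decide (¬ PySem.Int.mod n d = 0))) := by
  induction L generalizing xs with
  | nil => simp [pvExtend_nil]
  | cons e l ih =>
    simp only [List.foldl_cons, List.map_cons, List.filter_cons]
    by_cases hp : PySem.Int.mod (f e) d = 0
    · simp only [hp, decide_true, not_true, decide_false, Bool.false_eq_true, if_true, if_false]
      rw [ih, pvExtend_cons]
    · simp only [hp, decide_false, not_false_iff, decide_true, Bool.false_eq_true, if_true, if_false]
      rw [ih, pvExtend_cons, pvPushA_pvExtend_comm _ _ _ h]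

-- A's paired fold = (the list-only fold, count = src.length)
theorem pv_core (f : Int → Int) (d : Int) (t1 t2 : Nat)
    (src : List Int) (items : List (List Int)) (c : Int) :
    src.foldl (fun (st : List (List Int) × Int) entry =>
        let count := st.2 + 1
        let new := f entry
        if PySem.Int.mod new d = 0 then (pvPushA st.1 t1 new, count) else (pvPushA st.1 t2 new, count))
      (items, c)
    = (src.foldl (fun its e =>
        let new := f e
        if PySem.Int.mod new d = 0 then pvPushA its t1 new else pvPushA its t2 new) items,
       c + src.length) := by
  induction src generalizing items c with
  | nil => simp
  | cons x xs ih =>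
    simp only [List.foldl_cons]
    by_cases hm : PySem.Int.mod (f x) d = 0 <;>
      · simp only [hm, if_pos, if_false]
        rw [ih]
        refine Prod.ext ?_ ?_
        · simp [pvPushA]
        · simp; ring

-- one branch of the equivalence, with everything concrete but the rule data
theorem pv_branch (f : Int → Int) (d : Int) (t1 t2 s : Nat) (h : t1 ≠ t2)
    (src : List Int) (items : List (List Int)) :
    (let st := src.foldl (fun (st : List (List Int) × Int) entry =>
        let count := st.2 + 1
        let new := f entry
        if PySem.Int.mod new d = 0 then (pvPushA st.1 t1 new, count) else (pvPushA st.1 t2 new, count))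
      (items, (0 : Int))
     ((st.1.set s [], st.2) : List (List Int) × Int))
    = (let news := src.map f
       let divs := news.filter (fun n => decide (PySem.Int.mod n d = 0))
       let rest := news.filter (fun n => decide (¬ PySem.Int.mod n d = 0))
       let its := if divs.isEmpty then items else pvExtend items t1 divs
       let its := if rest.isEmpty then its else pvExtend its t2 rest
       ((its.set s [], (news.length : Int)) : List (List Int) × Int)) := by
  simp only [pvExtend_guard]
  rw [pv_core, pv_partition f d t1 t2 h]
  simp only [zero_add, List.length_map]

-- ===== VERDICT (by name: the statement is the Claim_ definition above) =====
theorem monkey_2_spec : Claim_equal_monkey_2 := by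
  intro id items _ _
  unfold Spec_monkey_2 monkey_2 monkey_2_alt
  by_cases h0 : id = 0
  · subst h0; exact pv_branch (fun e => e * 5) 3 7 4 0 (by omega) _ items
  by_cases h1 : id = 1
  · subst h1; exact pv_branch (fun e => e + 6) 17 3 0 1 (by omega) _ items
  by_cases h2 : id = 2
  · subst h2; exact pv_branch (fun e => e + 5) 2 3 1 2 (by omega) _ items
  by_cases h3 : id = 3
  · subst h3; exact pv_branch (fun e => e + 2) 19 7 0 3 (by omega) _ items
  by_cases h4 : id = 4
  · subst h4; exact pv_branch (fun e => e * 7) 11 5 6 4 (by omega) _ items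
  by_cases h5 : id = 5
  · subst h5; exact pv_branch (fun e => e + 7) 5 2 1 5 (by omega) _ items
  by_cases h6 : id = 6
  · subst h6; exact pv_branch (fun e => e + 1) 13 5 2 6 (by omega) _ items
  · have hnone : PySem.Dict.get? (⟨pvRules⟩ : PySem.Dict Int (PvOp × Int × Nat × Nat)) id = none := by
      simp only [PySem.Dict.get?, pvRules]
      simp
      omega
    simp only [h0, h1, h2, h3, h4, h5, h6, if_false, PySem.Dict.getD, hnone, Option.getD_none,
      Option.isSome_none, Bool.false_eq_true]
    exact pv_branch (fun e => e * e) 7 4 6 7 (by omega) _ items
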